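-- pv_equiv track=rewrite | github.com/badrjarjarah/SchoolHomwork | Python/Projects/facilityLocation.py | processLineCity
-- ===== SOURCE A (Python) =====
-- def processLineCity(line):
--     city = ""
--     for x in line:
--
--         if x == "[":
--             break
--         elif x != ",":
--             city = city + x
--     return city
-- ===== SOURCE B (Python) =====
-- def processLineCity(line):
--     return line.split("[")[0].replace(",", "")
-- ===== Notes on version B (the rewrite author's own statement) =====
-- stated objective: idiomatic
-- what changed: Replaces the manual character-by-character loop with break/accumulator by two library calls: split on the first bracket and strip commas with replace, avoiding quadratic string concatenation.
import Mathlib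
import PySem

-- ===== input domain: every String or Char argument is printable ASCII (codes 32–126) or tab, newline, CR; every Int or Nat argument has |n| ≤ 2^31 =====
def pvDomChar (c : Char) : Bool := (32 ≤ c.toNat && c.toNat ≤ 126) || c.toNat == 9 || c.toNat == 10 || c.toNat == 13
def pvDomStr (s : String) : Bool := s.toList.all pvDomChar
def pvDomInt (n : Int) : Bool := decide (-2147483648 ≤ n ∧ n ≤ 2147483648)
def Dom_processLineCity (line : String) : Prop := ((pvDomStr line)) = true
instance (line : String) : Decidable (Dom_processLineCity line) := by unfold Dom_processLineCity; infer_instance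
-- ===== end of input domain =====

-- B replaces A's manual character loop (break at '[', skip ',') by split-on-'[' + replace-commas; idiomatic, same cost.


-- ===== PORT A =====
-- the for-loop over the characters of `line`, with `break` on '[' and skipping ','
def processLineCityGo : List Char → List Char → List Char
  | [], city => city
  | x :: rest, city =>
    if x = '[' then city
    else if x ≠ ',' then processLineCityGo rest (city ++ [x])
    else processLineCityGo rest city

def processLineCity (line : String) : String :=
  String.ofList (processLineCityGo line.toList [])

-- ===== PORT B =====
-- line.split("[")[0].replace(",", "")
def processLineCity_alt (line : String) : String :=
  match PySem.Str.split? line "[" with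
  | some parts => PySem.Str.replace (parts.headD "") "," ""
  | none => ""

-- ===== PRECONDITION & SPEC =====
def Spec_processLineCity (line : String) (out : String) : Prop := out = processLineCity_alt line
instance (line : String) (out : String) : Decidable (Spec_processLineCity line out) := by unfold Spec_processLineCity; infer_instance

-- ===== CLAIM (what is proved, stated in full; the proofs are below) =====
def Claim_equal_processLineCity : Prop := ∀ (line : String), Dom_processLineCity line → Spec_processLineCity line (processLineCity line)

-- ===== LEMMAS AND PROOFS =====

-- A's loop computes: commas filtered out of the prefix before the first '['
theorem processLineCityGo_eq (cs acc : List Char) :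
    processLineCityGo cs acc
      = acc ++ (cs.takeWhile (fun c => !(c == '['))).filter (fun c => !(c == ',')) := by
  induction cs generalizing acc with
  | nil => simp [processLineCityGo]
  | cons x rest ih =>
    by_cases hx : x = '['
    · simp [processLineCityGo, hx]
    · by_cases hc : x = ','
      · simp [processLineCityGo, hc, ih]
      · simp [processLineCityGo, hx, hc, ih]

-- replace.go with old = [o], new = [] filters o out (given enough fuel)
theorem replaceGo_filter (o : Char) (fuel : Nat) (l acc : List Char) (h : l.length ≤ fuel) :
    PySem.Chars.replace.go [o] [] fuel l acc
      = acc.reverse ++ l.filter (fun c => !(c == o)) := by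
  induction fuel generalizing l acc with
  | zero =>
    have : l = [] := List.eq_nil_of_length_eq_zero (Nat.le_zero.mp h)
    subst this; simp [PySem.Chars.replace.go]
  | succ n ih =>
    cases l with
    | nil => simp [PySem.Chars.replace.go]
    | cons c t =>
      simp only [List.length_cons, Nat.succ_le_succ_iff] at h
      by_cases hc : o = c
      · subst hc
        simp [PySem.Chars.replace.go, List.isPrefixOf, ih t acc h, List.filter]
      · have hpre : ([o].isPrefixOf (c :: t)) = false := by
          simp [List.isPrefixOf, hc]
        have hco : (c == o) = false := beq_eq_false_iff_ne.mpr (Ne.symm hc)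
        simp [PySem.Chars.replace.go, hpre, ih t (c :: acc) h, List.filter, hco]

theorem replace_filter (o : Char) (cs : List Char) :
    PySem.Chars.replace cs [o] [] = cs.filter (fun c => !(c == o)) := by
  simpa using replaceGo_filter o cs.length cs [] (Nat.le_refl _)

-- splitOn.go with a single-char sep: first piece is cur.reverse ++ takeWhile (≠ sep)
theorem splitOnGo_head (o : Char) (fuel : Nat) (l cur : List Char) (acc : List (List Char)) (h : l.length < fuel) :
    ∃ ts, PySem.Chars.splitOn.go [o] fuel l cur acc
      = acc.reverse ++ (cur.reverse ++ l.takeWhile (fun c => !(c == o))) :: ts := by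
  induction fuel generalizing l cur acc with
  | zero => omega
  | succ n ih =>
    cases l with
    | nil =>
      exact ⟨[], by simp [PySem.Chars.splitOn.go]⟩
    | cons c t =>
      simp only [List.length_cons, Nat.succ_lt_succ_iff] at h
      by_cases hc : o = c
      · subst hc
        obtain ⟨ts, hts⟩ := ih t [] (cur.reverse :: acc) h
        refine ⟨(t.takeWhile (fun c => !(c == o))) :: ts, ?_⟩
        simp only [List.reverse_cons, List.reverse_nil, List.nil_append,
          List.append_assoc, List.singleton_append] at hts
        simp [PySem.Chars.splitOn.go, List.isPrefixOf, List.takeWhile, hts]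
      · have hpre : ([o].isPrefixOf (c :: t)) = false := by
          simp [List.isPrefixOf, hc]
        obtain ⟨ts, hts⟩ := ih t (c :: cur) acc h
        refine ⟨ts, ?_⟩
        have hco : (c == o) = false := beq_eq_false_iff_ne.mpr (Ne.symm hc)
        simp [PySem.Chars.splitOn.go, hpre, hts, List.takeWhile, hco]

theorem splitOn_head (o : Char) (cs : List Char) :
    ∃ ts, PySem.Chars.splitOn cs [o]
      = (cs.takeWhile (fun c => !(c == o))) :: ts := by
  obtain ⟨ts, hts⟩ := splitOnGo_head o (cs.length + 1) cs [] [] (Nat.lt_succ_self _)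
  exact ⟨ts, by simpa [PySem.Chars.splitOn] using hts⟩

-- ===== VERDICT (by name: the statement is the Claim_ definition above) =====
theorem processLineCity_spec : Claim_equal_processLineCity := by
  intro line _
  unfold Spec_processLineCity processLineCity processLineCity_alt
  obtain ⟨ts, hts⟩ := splitOn_head '[' line.toList
  simp [PySem.Str.split?, PySem.Chars.split?, hts, PySem.Str.replace,
    replace_filter, processLineCityGo_eq]
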